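-- pv_equiv track=rewrite | github.com/hcenge/emigroupsite | scripts/process_issue.py | bio_fm_to_items
-- ===== SOURCE A (Python) =====
-- BIO_KEY_ORDER = [
--     "title", "role", "tagline", "photo", "email", "join_year",
--     "research_interests", "projects", "showdate",
-- ]
--
-- def bio_fm_to_items(fm):
--     """Convert a bio front matter dict to an ordered list of (key, value) tuples."""
--     items = []
--     for key in BIO_KEY_ORDER:
--         if key in fm:
--             items.append((key, fm[key]))
--     # Include any extra keys not in the canonical order
--     for key in fm:
--         if key not in BIO_KEY_ORDER:
--             items.append((key, fm[key]))
--     return items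
-- ===== SOURCE B (Python) =====
-- BIO_KEY_ORDER = [
--     "title", "role", "tagline", "photo", "email", "join_year",
--     "research_interests", "projects", "showdate",
-- ]
--
-- def bio_fm_to_items(fm):
--     """Convert a bio front matter dict to an ordered list of (key, value) tuples."""
--     rank = {k: i for i, k in enumerate(BIO_KEY_ORDER)}
--     return sorted(fm.items(), key=lambda kv: rank.get(kv[0], len(BIO_KEY_ORDER)))
-- ===== Notes on version B (the rewrite author's own statement) =====
-- stated objective: idiomatic
-- what changed: A's two filtering scans (canonical keys probed in BIO_KEY_ORDER order, then a pass collecting extras) are replaced by a single stable sort of fm.items() keyed by the canonical index (extras all get the sentinel len(BIO_KEY_ORDER), so stability keeps their insertion order).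
import Mathlib
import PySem

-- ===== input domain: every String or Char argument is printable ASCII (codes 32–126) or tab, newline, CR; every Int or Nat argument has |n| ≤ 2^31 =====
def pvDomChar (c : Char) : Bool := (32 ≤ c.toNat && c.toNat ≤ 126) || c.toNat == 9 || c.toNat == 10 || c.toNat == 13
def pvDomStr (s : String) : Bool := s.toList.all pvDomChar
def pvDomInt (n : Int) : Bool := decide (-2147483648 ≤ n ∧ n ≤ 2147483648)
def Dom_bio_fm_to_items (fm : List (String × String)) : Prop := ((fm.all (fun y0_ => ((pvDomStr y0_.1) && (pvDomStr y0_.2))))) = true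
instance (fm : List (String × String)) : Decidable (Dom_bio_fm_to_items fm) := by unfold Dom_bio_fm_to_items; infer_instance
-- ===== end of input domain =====

-- B replaces A's two filtering scans by one stable sort of the items keyed by canonical
-- index (sentinel for extras) — objective: idiomatic, not faster.

-- ===== PORT A =====
def BIO_KEY_ORDER : List String :=
  ["title", "role", "tagline", "photo", "email", "join_year",
   "research_interests", "projects", "showdate"]

-- `fm[key]` is only evaluated under the `key in fm` guard (resp. with `key` drawn from
-- `fm`'s own keys), so the total `getD … ""` is exact there.
def bio_fm_to_items (fm : List (String × String)) : List (String × String) :=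
  let d := PySem.Dict.mk fm
  let items := BIO_KEY_ORDER.foldl (fun acc key =>
    if d.contains key then acc ++ [(key, d.getD key "")] else acc) []
  d.keys.foldl (fun acc key =>
    if BIO_KEY_ORDER.contains key then acc else acc ++ [(key, d.getD key "")]) items

-- ===== PORT B =====
def bio_fm_to_items_alt (fm : List (String × String)) : List (String × String) :=
  let d := PySem.Dict.mk fm
  let rank := PySem.Dict.ofList ((PySem.List.enumerate BIO_KEY_ORDER 0).map (fun p => (p.2, p.1)))
  PySem.List.sorted d.items (fun kv => rank.getD kv.1 (PySem.List.len BIO_KEY_ORDER)) false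

-- ===== PRECONDITION & SPEC =====
-- Pre_ excludes association lists with duplicate keys: A's parameter is a Python dict,
-- whose keys are unique, so a duplicate-key list does not represent a valid input and
-- its collapse to one entry is an accident of the dict conversion.
def Pre_bio_fm_to_items (fm : List (String × String)) : Prop := (fm.map Prod.fst).Nodup
instance (fm : List (String × String)) : Decidable (Pre_bio_fm_to_items fm) := by unfold Pre_bio_fm_to_items; infer_instance
def pvWitness_bio_fm_to_items : (List (String × String)) := [("role", "dev"), ("zz", "extra"), ("title", "Dr")]

def Spec_bio_fm_to_items (fm : List (String × String)) (out : List (String × String)) : Prop := out = bio_fm_to_items_alt fm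
instance (fm : List (String × String)) (out : List (String × String)) : Decidable (Spec_bio_fm_to_items fm out) := by unfold Spec_bio_fm_to_items; infer_instance

-- ===== CLAIM (what is proved, stated in full; the proofs are below) =====
def Claim_equal_bio_fm_to_items : Prop := ∀ (fm : List (String × String)), Dom_bio_fm_to_items fm → Pre_bio_fm_to_items fm → Spec_bio_fm_to_items fm (bio_fm_to_items fm)

-- ===== LEMMAS AND PROOFS =====

-- B's rank of a key, named for the proofs.
def pvRk (k : String) : Int :=
  (PySem.Dict.ofList ((PySem.List.enumerate BIO_KEY_ORDER 0).map (fun p => (p.2, p.1)))).getD k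
    (PySem.List.len BIO_KEY_ORDER)

-- bucket j of fm under pvRk
def pvBkt (fm : List (String × String)) (j : Nat) : List (String × String) :=
  fm.filter (fun p => decide (pvRk p.1 = (j : Int)))

set_option maxHeartbeats 1000000 in
theorem pvRk_unfold (k : String) : pvRk k =
    (if "title" = k then 0 else if "role" = k then 1 else if "tagline" = k then 2 else
     if "photo" = k then 3 else if "email" = k then 4 else if "join_year" = k then 5 else
     if "research_interests" = k then 6 else if "projects" = k then 7 else
     if "showdate" = k then 8 else 9) := by
  have hmk : PySem.Dict.ofList ((PySem.List.enumerate BIO_KEY_ORDER 0).map (fun p => (p.2, p.1)))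
      = PySem.Dict.mk [("title", (0:Int)), ("role", 1), ("tagline", 2), ("photo", 3),
          ("email", 4), ("join_year", 5), ("research_interests", 6), ("projects", 7), ("showdate", 8)] := by
    rfl
  rw [pvRk, hmk]
  simp [PySem.Dict.getD_eq_get?_getD, PySem.Dict.get?_mk_cons, PySem.List.len_eq, BIO_KEY_ORDER]
  split_ifs <;> rfl

theorem pvRk_bound (k : String) : 0 ≤ pvRk k ∧ pvRk k < 10 := by
  rw [pvRk_unfold]; split_ifs <;> omega

theorem pvRk_nine (k : String) : decide (pvRk k = (9 : Int)) = !BIO_KEY_ORDER.contains k := by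
  rw [pvRk_unfold]
  split_ifs with h1 h2 h3 h4 h5 h6 h7 h8 h9 <;>
    simp_all [BIO_KEY_ORDER, eq_comm]

set_option maxHeartbeats 4000000 in
theorem pvRk_mem (j : Nat) (hj : j < 9) (k : String) :
    pvRk k = (j : Int) ↔ k = BIO_KEY_ORDER.getD j "" := by
  interval_cases j <;> rw [pvRk_unfold] <;>
    split_ifs <;> simp_all [BIO_KEY_ORDER, eq_comm]

-- insert into a bucketed list: skips everything not strictly after x, lands before bs
theorem insertBy_middle {α : Type} (before : α → α → Bool) (x : α) (as bs : List α)
    (ha : ∀ a ∈ as, before x a = false) (hb : ∀ b ∈ bs, before x b = true) :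
    PySem.List.insertBy before x (as ++ bs) = as ++ x :: bs := by
  induction as with
  | nil =>
    cases bs with
    | nil => simp [PySem.List.insertBy]
    | cons b t => simp [PySem.List.insertBy, hb b (by simp)]
  | cons a as ih =>
    have h0 : before x a = false := ha a (by simp)
    simp only [List.cons_append, PySem.List.insertBy, h0]
    simp [ih (fun a' h' => ha a' (by simp [h']))]

-- stable sort of Int-keyed items with keys in [0, N) is the concatenation of key-buckets
theorem sorted_buckets {α : Type} (key : α → Int) (N : Nat) (xs : List α)
    (h : ∀ x ∈ xs, 0 ≤ key x ∧ key x < N) :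
    PySem.List.sorted xs key false
      = (List.range N).flatMap (fun (j : Nat) => xs.filter (fun y => decide (key y = (j : Int)))) := by
  induction xs using List.reverseRecOn with
  | nil => simp [PySem.List.sorted]
  | append_singleton xs x ih =>
    have hx := h x (by simp)
    have hkN : (key x).toNat < N := by omega
    have hkx : key x = ((key x).toNat : Int) := by omega
    set k := (key x).toNat with hk
    have hstep : PySem.List.sorted (xs ++ [x]) key false
        = PySem.List.insertBy (fun a b => decide (key a < key b)) x (PySem.List.sorted xs key false) := by
      rw [PySem.List.sorted_eq_foldl_insertBy, PySem.List.sorted_eq_foldl_insertBy, List.foldl_append]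
      rfl
    rw [hstep, ih (fun y hy => h y (by simp [hy]))]
    have hsplit : List.range N = List.range (k + 1) ++ (List.range (N - (k + 1))).map (fun i => (k + 1) + i) := by
      rw [← List.range_add]; congr 1; omega
    have has : ∀ a ∈ (List.range (k + 1)).flatMap (fun (j : Nat) => xs.filter (fun y => decide (key y = (j : Int)))),
        decide (key x < key a) = false := by
      intro a hamem
      simp only [List.mem_flatMap, List.mem_range, List.mem_filter, decide_eq_true_eq] at hamem
      obtain ⟨j, hj, _, hkey⟩ := hamem
      simp only [decide_eq_false_iff_not, not_lt]
      omega
    have hbs : ∀ b ∈ ((List.range (N - (k + 1))).map (fun i => (k + 1) + i)).flatMap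
        (fun (j : Nat) => xs.filter (fun y => decide (key y = (j : Int)))),
        decide (key x < key b) = true := by
      intro b hbmem
      simp only [List.mem_flatMap, List.mem_map, List.mem_range, List.mem_filter, decide_eq_true_eq] at hbmem
      obtain ⟨j, ⟨i, hi, hij⟩, _, hkey⟩ := hbmem
      simp only [decide_eq_true_eq]
      omega
    rw [hsplit, List.flatMap_append, insertBy_middle _ _ _ _ has hbs, List.flatMap_append]
    have hbig : ((List.range (N - (k + 1))).map (fun i => (k + 1) + i)).flatMap
          (fun (j : Nat) => (xs ++ [x]).filter (fun y => decide (key y = (j : Int))))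
        = ((List.range (N - (k + 1))).map (fun i => (k + 1) + i)).flatMap
          (fun (j : Nat) => xs.filter (fun y => decide (key y = (j : Int)))) := by
      apply List.flatMap_congr
      intro j hjmem
      simp only [List.mem_map, List.mem_range] at hjmem
      obtain ⟨i, hi, hij⟩ := hjmem
      rw [List.filter_append]
      have : (key x = (j : Int)) = False := by
        simp only [eq_iff_iff, iff_false]; omega
      simp [this]
    have hsmall : (List.range (k + 1)).flatMap
          (fun (j : Nat) => (xs ++ [x]).filter (fun y => decide (key y = (j : Int))))
        = (List.range k).flatMap (fun (j : Nat) => xs.filter (fun y => decide (key y = (j : Int))))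
          ++ (xs.filter (fun y => decide (key y = (k : Int))) ++ [x]) := by
      rw [List.range_succ, List.flatMap_append]
      congr 1
      · apply List.flatMap_congr
        intro j hjmem
        simp only [List.mem_range] at hjmem
        rw [List.filter_append]
        have : (key x = (j : Int)) = False := by
          simp only [eq_iff_iff, iff_false]; omega
        simp [this]
      · simp [List.filter_append, hkx]
    rw [hbig, hsmall, List.range_succ, List.flatMap_append]
    simp [List.append_assoc]

-- A's append-if loop over the dict keys, flipped to foldl_append_if's shape
theorem flip_if {β : Type} (p : String → Bool) (f : String → β) :
    (fun (acc : List β) key => if p key = true then acc else acc ++ [f key])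
      = (fun acc key => if (!p key) = true then acc ++ [f key] else acc) := by
  funext acc key
  by_cases h : p key <;> simp [h]

-- mapping the kept keys back through the dict lookup reproduces the filtered items
theorem map_getD_filter (d : PySem.Dict String String) (q : String → Bool) :
    ∀ (l : List (String × String)), (∀ p ∈ l, d.getD p.1 "" = p.2) →
      ((l.map Prod.fst).filter q).map (fun k => (k, d.getD k "")) = l.filter (fun p => q p.1) := by
  intro l
  induction l with
  | nil => simp
  | cons p l ih =>
    intro hl
    have hp : d.getD p.1 "" = p.2 := hl p (by simp)
    have ihl := ih (fun p' h' => hl p' (by simp [h']))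
    by_cases h : q p.1 <;> simp [h, ihl, hp]

-- under distinct keys, the pairs whose key is c form the singleton the dict lookup yields
theorem bucket_single (c : String) :
    ∀ (l : List (String × String)), (l.map Prod.fst).Nodup →
      l.filter (fun p => decide (p.1 = c))
        = (if l.any (fun p => p.1 == c) then [(c, ((l.find? (fun p => p.1 == c)).map Prod.snd).getD "")] else []) := by
  intro l
  induction l with
  | nil => simp
  | cons p l ih =>
    intro hnd
    rw [List.map_cons, List.nodup_cons] at hnd
    have hnd' : (l.map Prod.fst).Nodup := hnd.2
    have hnotin : p.1 ∉ l.map Prod.fst := hnd.1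
    by_cases h : p.1 = c
    · have hnil : l.filter (fun p' => decide (p'.1 = c)) = [] := by
        rw [List.filter_eq_nil_iff]
        intro p' hp'
        simp only [decide_eq_true_eq]
        intro hc
        exact hnotin (h ▸ hc ▸ List.mem_map_of_mem hp')
      simp [h, hnil, Prod.ext_iff]
    · have hb : (p.1 == c) = false := by simpa using h
      simp only [List.filter_cons, List.any_cons, List.find?_cons, hb, Bool.false_or]
      simp [h, ih hnd']

-- (l.filter p).map f as a flatMap of singletons
theorem filter_map_flatMap {β : Type} (p : String → Bool) (f : String → β) (l : List String) :
    (l.filter p).map f = l.flatMap (fun k => if p k then [f k] else []) := by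
  induction l with
  | nil => simp
  | cons a l ih =>
    by_cases h : p a <;> simp [h, ih]

theorem alt_eq_buckets (fm : List (String × String)) :
    bio_fm_to_items_alt fm = (List.range 10).flatMap (pvBkt fm) := by
  have h0 : bio_fm_to_items_alt fm = PySem.List.sorted fm (fun kv => pvRk kv.1) false := rfl
  rw [h0, sorted_buckets (fun kv => pvRk kv.1) 10 fm (fun y _ => pvRk_bound y.1)]
  rfl

-- ===== VERDICT (by name: the statement is the Claim_ definition above) =====
theorem bio_fm_to_items_spec : Claim_equal_bio_fm_to_items := by
  intro fm _ hpre
  unfold Spec_bio_fm_to_items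
  have hnd : (fm.map Prod.fst).Nodup := hpre
  -- A's result in closed form
  have hA : bio_fm_to_items fm
      = (BIO_KEY_ORDER.filter ((PySem.Dict.mk fm).contains)).map
          (fun k => (k, (PySem.Dict.mk fm).getD k ""))
        ++ fm.filter (fun p => !BIO_KEY_ORDER.contains p.1) := by
    show (PySem.Dict.mk fm).keys.foldl _ (BIO_KEY_ORDER.foldl _ []) = _
    rw [PySem.List.foldl_append_if, flip_if, PySem.List.foldl_append_if]
    have hkeys : (PySem.Dict.mk fm).keys = fm.map Prod.fst := rfl
    rw [hkeys, map_getD_filter (PySem.Dict.mk fm) _ fm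
      (fun p hp => PySem.Dict.getD_of_mem_items (d := PySem.Dict.mk fm) hp hnd "")]
    rw [List.nil_append]
  -- the extras are exactly bucket 9
  have hextra : fm.filter (fun p => !BIO_KEY_ORDER.contains p.1) = pvBkt fm 9 := by
    unfold pvBkt
    apply (List.filter_congr _).symm
    intro p _
    exact pvRk_nine p.1
  -- the canonical scan is exactly buckets 0..8
  have hcanon : (BIO_KEY_ORDER.filter ((PySem.Dict.mk fm).contains)).map
        (fun k => (k, (PySem.Dict.mk fm).getD k ""))
      = (List.range 9).flatMap (pvBkt fm) := by
    rw [filter_map_flatMap]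
    have hBIO : BIO_KEY_ORDER = (List.range 9).map (fun j => BIO_KEY_ORDER.getD j "") := by decide
    conv_lhs => rw [hBIO]
    rw [List.flatMap_map]
    apply (List.flatMap_congr _)
    intro j hjmem
    have hj : j < 9 := List.mem_range.mp hjmem
    have hfilter : pvBkt fm j = fm.filter (fun p => decide (p.1 = BIO_KEY_ORDER.getD j "")) := by
      unfold pvBkt
      apply List.filter_congr
      intro p _
      exact decide_eq_decide.mpr (pvRk_mem j hj p.1)
    rw [hfilter, bucket_single _ fm hnd]
    rfl
  rw [hA, hextra, hcanon, alt_eq_buckets]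
  have h10 : List.range 10 = List.range 9 ++ [9] := by decide
  rw [h10, List.flatMap_append]
  simp only [List.flatMap_cons, List.flatMap_nil, List.append_nil]
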